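-- pv_equiv track=rewrite | github.com/Global-Health-Engineering/autoclean | Functions/Structural_Errors_Simple.py | _choose_canonical
-- ===== SOURCE A (Python) =====
-- def _choose_canonical(values: list) -> str:
--     """
--     Choose the canonical (standard) form from a list of similar values.
--
--     Strategy:
--     1. Prefer Title Case versions (e.g., "Hospital" over "hospital")
--     2. If multiple title case, prefer longer (more complete) version
--     3. If still tied, use alphabetical order for consistency
--     """
--
--     scored_values = []
--
--     for v in values:
--         score = 0
--
--         # Prefer Title Case (first letter uppercase, rest lowercase per word)
--         if v == v.title():
--             score += 100
--         # Also give some points for first letter uppercase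
--         elif len(v) > 0 and v[0].isupper():
--             score += 50
--
--         # Prefer longer strings (more complete/descriptive)
--         score += len(v)
--
--         scored_values.append((score, v))
--
--     # Sort by score (descending), then alphabetically for consistency
--     scored_values.sort(key=lambda x: (-x[0], x[1]))
--
--     return scored_values[0][1]
-- ===== SOURCE B (Python) =====
-- def _choose_canonical(values: list) -> str:
--     # One-pass argmax: keep the best (score, value) pair seen so far,
--     # preferring higher score, then alphabetically smaller value.
--     best = None
--     for v in values:
--         if v == v.title():
--             s = 100 + len(v)
--         elif v and v[0].isupper():
--             s = 50 + len(v)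
--         else:
--             s = len(v)
--         if best is None or s > best[0] or (s == best[0] and v < best[1]):
--             best = (s, v)
--     return best[1]
-- ===== Notes on version B (the rewrite author's own statement) =====
-- stated objective: faster
-- what changed: B replaces A's build-a-scored-list + full sort + take-head with a single-pass running argmax that keeps the best (score, value) pair (higher score wins, ties broken by the alphabetically smaller string), so no intermediate list is sorted.
-- outside the precondition, e.g. on _choose_canonical([]): A raises IndexError, B raises TypeError
import Mathlib
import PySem

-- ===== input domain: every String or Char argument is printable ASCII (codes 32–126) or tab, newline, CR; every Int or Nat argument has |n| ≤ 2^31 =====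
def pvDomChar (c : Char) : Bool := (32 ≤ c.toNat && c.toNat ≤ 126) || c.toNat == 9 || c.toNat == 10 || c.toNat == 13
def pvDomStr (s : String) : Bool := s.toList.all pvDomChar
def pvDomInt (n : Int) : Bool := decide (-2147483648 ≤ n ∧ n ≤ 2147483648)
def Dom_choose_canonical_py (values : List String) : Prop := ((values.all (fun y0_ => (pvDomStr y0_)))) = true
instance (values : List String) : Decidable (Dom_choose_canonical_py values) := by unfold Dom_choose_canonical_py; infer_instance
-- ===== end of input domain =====

-- B is a one-pass argmax with tie-break instead of A's build-score-list + full sort + head.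

-- ===== PORT A =====
-- hand port of str.title() (exact on the ASCII domain: a char is cased iff isalpha)
def pvTitle : List Char → Bool → List Char
  | [], _ => []
  | c :: cs, prev =>
    if PySem.Chars.isalpha c then
      (if prev then PySem.Chars.lowerChar c else PySem.Chars.upperChar c) :: pvTitle cs true
    else c :: pvTitle cs false

-- the score A assigns inside its loop
def pvScoreA (v : String) : Int :=
  let score : Int := 0
  let score := if v.toList = pvTitle v.toList false then score + 100
    else if (match v.toList with | c :: _ => PySem.Chars.isupper c | [] => false) then score + 50
    else score
  score + PySem.Str.len v

def choose_canonical_py (values : List String) : String :=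
  let scored := values.foldl (fun acc v => acc ++ [(pvScoreA v, v)]) []
  let sortedV := PySem.List.sorted2 scored (fun x => -x.1) (fun x => x.2)
  match PySem.List.pyGet? sortedV 0 with
  | some p => p.2
  | none => ""   -- Python: IndexError (empty input); excluded by Pre_

-- ===== PORT B =====
-- the score B assigns (same blend, written as B writes it)
def pvScoreB (v : String) : Int :=
  if v.toList = pvTitle v.toList false then 100 + PySem.Str.len v
  else if (match v.toList with | c :: _ => PySem.Chars.isupper c | [] => false) then 50 + PySem.Str.len v
  else PySem.Str.len v

def choose_canonical_py_alt (values : List String) : String :=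
  let best := values.foldl (fun best v =>
      let s := pvScoreB v
      match best with
      | none => some (s, v)
      | some b => if s > b.1 ∨ (s = b.1 ∧ v < b.2) then some (s, v) else some b)
    none
  match best with
  | some b => b.2
  | none => ""   -- Python: TypeError (empty input); excluded by Pre_

-- ===== PRECONDITION & SPEC =====
-- A raises IndexError (and B TypeError) on the empty list: excluded.
def Pre_choose_canonical_py (values : List String) : Prop := values ≠ []
instance (values : List String) : Decidable (Pre_choose_canonical_py values) := by unfold Pre_choose_canonical_py; infer_instance
def pvWitness_choose_canonical_py : List String := ["hospital", "Hospital"]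

def Spec_choose_canonical_py (values : List String) (out : String) : Prop := out = choose_canonical_py_alt values
instance (values : List String) (out : String) : Decidable (Spec_choose_canonical_py values out) := by unfold Spec_choose_canonical_py; infer_instance

-- ===== CLAIM (what is proved, stated in full; the proofs are below) =====
def Claim_equal_choose_canonical_py : Prop := ∀ (values : List String), Dom_choose_canonical_py values → Pre_choose_canonical_py values → Spec_choose_canonical_py values (choose_canonical_py values)

-- ===== LEMMAS AND PROOFS =====

-- the lexicographic key both programs effectively minimise
def pvKey (x : Int × String) : Lex (Int × String) := toLex (-x.1, x.2)

-- B's fold step, named for the proofs (definitionally the step in the port)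
def pvStep (best : Option (Int × String)) (v : String) : Option (Int × String) :=
  let s := pvScoreB v
  match best with
  | none => some (s, v)
  | some b => if s > b.1 ∨ (s = b.1 ∧ v < b.2) then some (s, v) else some b

theorem pvKey_inj : Function.Injective pvKey := by
  intro a b h
  unfold pvKey at h
  have h' := congrArg ofLex h
  simp only [ofLex_toLex, Prod.mk.injEq] at h'
  exact Prod.ext (by omega) h'.2

theorem pvScoreA_eq_B (v : String) : pvScoreA v = pvScoreB v := by
  unfold pvScoreA pvScoreB
  split_ifs <;> ring

theorem foldl_append_map (values : List String) (acc : List (Int × String)) :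
    values.foldl (fun acc v => acc ++ [(pvScoreA v, v)]) acc
      = acc ++ values.map (fun v => (pvScoreA v, v)) := by
  induction values generalizing acc with
  | nil => simp
  | cons v vs ih => simp [List.foldl, ih]

theorem sorted2_eq_sorted_lex (xs : List (Int × String)) :
    PySem.List.sorted2 xs (fun x => -x.1) (fun x => x.2)
      = PySem.List.sorted xs pvKey := by
  have hbe : (fun (a b : Int × String) =>
        decide (-a.1 < -b.1) || (!decide (-b.1 < -a.1) && decide (a.2 < b.2)))
      = fun a b => decide (pvKey a < pvKey b) := by
    funext a b
    by_cases h1 : -a.1 < -b.1 <;> by_cases h2 : -b.1 < -a.1 <;>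
      by_cases h3 : a.2 < b.2 <;>
      simp [h1, h2, h3, pvKey, Prod.Lex.lt_iff] <;> omega
  show List.foldl (fun acc x => PySem.List.insertBy (fun a b =>
        decide (-a.1 < -b.1) || (!decide (-b.1 < -a.1) && decide (a.2 < b.2))) x acc) [] xs
      = List.foldl (fun acc x => PySem.List.insertBy (fun a b => decide (pvKey a < pvKey b)) x acc) [] xs
  rw [hbe]

-- B's fold keeps an element of the scored list whose pvKey is minimal so far
theorem b_fold_min (l : List String) (b : Int × String) :
    ∃ r, l.foldl pvStep (some b) = some r ∧
      (r = b ∨ r ∈ l.map (fun v => (pvScoreB v, v))) ∧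
      pvKey r ≤ pvKey b ∧ ∀ v ∈ l, pvKey r ≤ pvKey (pvScoreB v, v) := by
  induction l generalizing b with
  | nil => exact ⟨b, rfl, Or.inl rfl, le_refl _, by simp⟩
  | cons v vs ih =>
    rw [List.foldl_cons]
    by_cases hc : pvScoreB v > b.1 ∨ (pvScoreB v = b.1 ∧ v < b.2)
    · have hstep : pvStep (some b) v = some (pvScoreB v, v) := by
        unfold pvStep; simp only [if_pos hc]
      rw [hstep]
      obtain ⟨r, hr, hmem, hle, hall⟩ := ih (pvScoreB v, v)
      refine ⟨r, hr, ?_, ?_, ?_⟩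
      · rcases hmem with h | h
        · exact Or.inr (by rw [h]; exact List.mem_cons_self ..)
        · exact Or.inr (List.mem_cons_of_mem _ h)
      · refine le_trans hle (le_of_lt ?_)
        simp only [pvKey, Prod.Lex.lt_iff, ofLex_toLex]
        rcases hc with h | ⟨h1, h2⟩
        · left; omega
        · right; exact ⟨by omega, h2⟩
      · intro w hw
        rcases List.mem_cons.mp hw with h | h
        · subst h; exact hle
        · exact hall w h
    · have hstep : pvStep (some b) v = some b := by
        unfold pvStep; simp only [if_neg hc]
      rw [hstep]
      obtain ⟨r, hr, hmem, hle, hall⟩ := ih b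
      refine ⟨r, hr, ?_, hle, ?_⟩
      · rcases hmem with h | h
        · exact Or.inl h
        · exact Or.inr (List.mem_cons_of_mem _ h)
      · intro w hw
        rcases List.mem_cons.mp hw with h | h
        · subst h
          refine le_trans hle ?_
          push Not at hc
          simp only [pvKey, Prod.Lex.toLex_le_toLex]
          by_cases he : pvScoreB w = b.1
          · right; exact ⟨by omega, le_of_not_gt (hc.2 he)⟩
          · left; have := hc.1; omega
        · exact hall w h

-- ===== VERDICT (by name: the statement is the Claim_ definition above) =====
theorem choose_canonical_py_spec : Claim_equal_choose_canonical_py := by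
  intro values _hdom hpre
  unfold Spec_choose_canonical_py choose_canonical_py choose_canonical_py_alt
  cases values with
  | nil => exact absurd rfl hpre
  | cons v0 vs =>
    simp only [foldl_append_map, List.nil_append, sorted2_eq_sorted_lex]
    have hmap : (v0 :: vs).map (fun v => (pvScoreA v, v))
        = (v0 :: vs).map (fun v => (pvScoreB v, v)) := by
      simp [pvScoreA_eq_B]
    rw [hmap]
    set L := (v0 :: vs).map (fun v => (pvScoreB v, v)) with hL
    have hLne : L ≠ [] := by simp [hL]
    obtain ⟨m, t, hs⟩ : ∃ m t, PySem.List.sorted L pvKey = m :: t := by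
      cases h : PySem.List.sorted L pvKey with
      | nil => exact absurd ((PySem.List.sorted_eq_nil_iff L pvKey false).mp h) hLne
      | cons m t => exact ⟨m, t, rfl⟩
    have hmmin : ∀ y ∈ L, pvKey m ≤ pvKey y :=
      PySem.List.key_head_sorted_le L pvKey hs
    have hmmem : m ∈ L :=
      ((PySem.List.sorted_perm L pvKey false).mem_iff).mp (by rw [hs]; exact List.mem_cons_self ..)
    obtain ⟨r, hr, hrmem, hrle, hrall⟩ := b_fold_min vs (pvScoreB v0, v0)
    have hrmem' : r ∈ L := by
      rcases hrmem with h | h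
      · rw [hL, h]; exact List.mem_cons_self ..
      · rw [hL]; exact List.mem_cons_of_mem _ h
    have hrmin : ∀ y ∈ L, pvKey r ≤ pvKey y := by
      intro y hy
      rw [hL] at hy
      rcases List.mem_cons.mp hy with h | h
      · rw [h]; exact hrle
      · obtain ⟨w, hw, rfl⟩ := List.mem_map.mp h
        exact hrall w hw
    have hmr : m = r := pvKey_inj (le_antisymm (hmmin r hrmem') (hrmin m hmmem))
    have hfold : (v0 :: vs).foldl pvStep none = some r := by
      rw [List.foldl_cons]
      show vs.foldl pvStep (some (pvScoreB v0, v0)) = some r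
      exact hr
    show (match PySem.List.pyGet? (PySem.List.sorted L pvKey) 0 with
          | some p => p.2 | none => "")
        = (match (v0 :: vs).foldl pvStep none with
          | some b => b.2 | none => "")
    rw [hs, hfold, hmr]
    simp [PySem.List.pyGet?, PySem.List.pyIdx?]
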